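-- pv_equiv track=rewrite | github.com/MrBrantCode/unitest_baseline | mut_generate/mist_train_taco/taco_16234/solution.py | minimum_variables_needed
-- ===== SOURCE A (Python) =====
-- def minimum_variables_needed(sequence):
--     def can_solve(x, B):
--         if (X, x, B) in memo:
--             return memo[X, x, B]
--         if len(B) > X:
--             return False
--         if x == len(sequence):
--             return True
--         if can_form(sequence[x], B):
--             A = list(B)
--             for e in range(len(B)):
--                 r = A[e]
--                 A[e] = sequence[x]
--                 if can_solve(x + 1, tuple(sorted(A))):
--                     memo[X, x, B] = True
--                     return True
--                 A[e] = r
--             A.append(sequence[x])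
--             if can_solve(x + 1, tuple(sorted(A))):
--                 memo[X, x, B] = True
--                 return True
--         memo[X, x, B] = False
--         return False
--
--     def can_form(x, B):
--         for i in range(len(B)):
--             for j in range(i, len(B)):
--                 if B[i] + B[j] == x:
--                     return True
--         return False
--
--     n = len(sequence)
--     memo = {}
--     for X in range(1, n + 1):
--         if can_solve(1, (sequence[0],)):
--             return X
--     return -1
-- ===== SOURCE B (Python) =====
-- def minimum_variables_needed(sequence):
--     # Forward BFS over reachable variable-multisets (one pass, no memoised
--     # per-X depth-first search): answer = smallest final multiset size.
--     n = len(sequence)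
--     if n == 0:
--         return -1
--     frontier = {(sequence[0],)}
--     for t in sequence[1:]:
--         nxt = set()
--         for S in frontier:
--             vals = set(S)
--             if any((t - b) in vals for b in vals):
--                 for i in range(len(S)):
--                     nxt.add(tuple(sorted(S[:i] + (t,) + S[i + 1:])))
--                 nxt.add(tuple(sorted(S + (t,))))
--         frontier = nxt
--     return min((len(S) for S in frontier), default=-1)
-- ===== Notes on version B (the rewrite author's own statement) =====
-- stated objective: faster
-- what changed: A's per-X memoised depth-first backtracking (restarted for every candidate X from 1 to n, with an O(m^2) nested pairwise-sum scan) is replaced by a single forward BFS over the set of reachable variable-multisets with an O(m) hash-set pairwise-sum test; the answer is the smallest final multiset size, which equals A's least feasible X because multiset size never decreases along a path.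
import Mathlib
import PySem

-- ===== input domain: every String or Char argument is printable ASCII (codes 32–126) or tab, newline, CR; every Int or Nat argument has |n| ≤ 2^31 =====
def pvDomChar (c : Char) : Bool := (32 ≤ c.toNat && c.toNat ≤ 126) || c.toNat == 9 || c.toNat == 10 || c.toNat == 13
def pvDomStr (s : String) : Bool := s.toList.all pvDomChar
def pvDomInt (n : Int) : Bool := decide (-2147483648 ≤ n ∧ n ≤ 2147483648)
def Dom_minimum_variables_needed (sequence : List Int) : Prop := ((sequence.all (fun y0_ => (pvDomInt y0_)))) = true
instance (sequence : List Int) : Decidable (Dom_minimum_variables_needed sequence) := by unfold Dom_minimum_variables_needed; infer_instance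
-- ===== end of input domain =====

-- B replaces A's per-X memoised depth-first search by a single forward BFS over
-- reachable variable multisets with a set-based pairwise-sum test (objective: faster).

-- ===== PORT A =====
-- memo : dict keyed by (X, x, B) as in the Python
abbrev MemoA := PySem.Dict (Int × Int × List Int) Bool

-- can_form(x, B): nested i ≤ j scan over pairs
def canFormA (x : Int) (B : List Int) : Bool :=
  (PySem.List.pyRange 0 (B.length : Int) 1).any fun i =>
    (PySem.List.pyRange i (B.length : Int) 1).any fun j =>
      PySem.List.pyGetD B i 0 + PySem.List.pyGetD B j 0 == x

-- can_solve(x, B); the mutated memo dict is threaded through; fuel is only a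
-- termination device (never exhausted on the calls the outer loop makes).
-- A[e] = sequence[x] on the copy A = list(B) is List.set; the pyRange indices e
-- are nonnegative, so e.toNat is exact here.
def canSolveA (seq : List Int) (X : Int) : Nat → Int → List Int → MemoA → Bool × MemoA
  | 0, _, _, memo => (false, memo)
  | fuel + 1, x, B, memo =>
    match PySem.Dict.get? memo (X, x, B) with
    | some v => (v, memo)
    | none =>
      if (B.length : Int) > X then (false, memo)
      else if x == (seq.length : Int) then (true, memo)
      else
        let t := PySem.List.pyGetD seq x 0
        if canFormA t B then
          let st := (PySem.List.pyRange 0 (B.length : Int) 1).foldl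
            (fun (st : Bool × MemoA) e =>
              if st.1 then st
              else canSolveA seq X fuel (x + 1)
                     (PySem.List.sorted (B.set e.toNat t) (fun v => v) false) st.2)
            (false, memo)
          if st.1 then (true, PySem.Dict.insert st.2 (X, x, B) true)
          else
            let r := canSolveA seq X fuel (x + 1)
                       (PySem.List.sorted (B ++ [t]) (fun v => v) false) st.2
            if r.1 then (true, PySem.Dict.insert r.2 (X, x, B) true)
            else (false, PySem.Dict.insert r.2 (X, x, B) false)
        else (false, PySem.Dict.insert memo (X, x, B) false)

-- for X in range(1, n + 1): if can_solve(1, (sequence[0],)): return X — memo persists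
def outerLoopA (seq : List Int) : List Int → MemoA → Int
  | [], _ => -1
  | X :: rest, memo =>
    let r := canSolveA seq X (seq.length + 1) 1 [PySem.List.pyGetD seq 0 0] memo
    if r.1 then X else outerLoopA seq rest r.2

def minimum_variables_needed (sequence : List Int) : Int :=
  outerLoopA sequence (PySem.List.pyRange 1 ((sequence.length : Int) + 1) 1) PySem.Dict.empty

-- ===== PORT B =====
def minimum_variables_needed_alt (sequence : List Int) : Int :=
  match sequence with
  | [] => -1
  | s0 :: rest =>
    let final : PySem.Set (List Int) := rest.foldl
      (fun frontier t =>
        frontier.foldl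
          (fun (nxt : PySem.Set (List Int)) S =>
            let vals : PySem.Set Int := PySem.Set.ofList S
            if vals.any (fun b => PySem.Set.contains vals (t - b)) then
              let nxt := (List.range S.length).foldl
                (fun (nxt : PySem.Set (List Int)) i =>
                  PySem.Set.add nxt (PySem.List.sorted (S.set i t) (fun v => v) false)) nxt
              PySem.Set.add nxt (PySem.List.sorted (S ++ [t]) (fun v => v) false)
            else nxt)
          PySem.Set.empty)
      (PySem.Set.ofList [[s0]])
    PySem.List.minD (final.map (fun S => (S.length : Int))) (fun v => v) (-1)

-- ===== PRECONDITION & SPEC =====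
def Spec_minimum_variables_needed (sequence : List Int) (out : Int) : Prop := out = minimum_variables_needed_alt sequence
instance (sequence : List Int) (out : Int) : Decidable (Spec_minimum_variables_needed sequence out) := by unfold Spec_minimum_variables_needed; infer_instance

-- ===== CLAIM (what is proved, stated in full; the proofs are below) =====
def Claim_equal_minimum_variables_needed : Prop := ∀ (sequence : List Int), Dom_minimum_variables_needed sequence → Spec_minimum_variables_needed sequence (minimum_variables_needed sequence)

-- ===== LEMMAS AND PROOFS =====

-- children of a state B on target t: the sorted results of A's replace/append moves
def childrenP (t : Int) (B : List Int) : List (List Int) :=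
  if canFormA t B then
    (List.range B.length).map (fun i => PySem.List.sorted (B.set i t) (fun v => v) false)
      ++ [PySem.List.sorted (B ++ [t]) (fun v => v) false]
  else []

-- final states reachable from B through the remaining targets
def finalsP : List Int → List Int → List (List Int)
  | [], B => [B]
  | t :: ts, B => (childrenP t B).flatMap (finalsP ts)

-- memo-free meaning of can_solve
def solvesP (X : Int) : (ts : List Int) → (B : List Int) → Bool
  | ts, B =>
    if (B.length : Int) > X then false
    else
      match ts with
      | [] => true
      | t :: ts' => (childrenP t B).any (fun C => solvesP X ts' C)

theorem solvesP_gt {X : Int} {ts B : List Int} (h : (B.length : Int) > X) :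
    solvesP X ts B = false := by
  rw [solvesP.eq_def]; simp [h]

theorem solvesP_nil {X : Int} {B : List Int} (h : ¬ (B.length : Int) > X) :
    solvesP X [] B = true := by
  rw [solvesP.eq_def]; simp [h]

theorem solvesP_cons {X t : Int} {ts B : List Int} (h : ¬ (B.length : Int) > X) :
    solvesP X (t :: ts) B = (childrenP t B).any (fun C => solvesP X ts C) := by
  rw [solvesP.eq_def]; simp [h]

theorem canForm_iff (t : Int) (S : List Int) :
    canFormA t S = true ↔ ∃ a ∈ S, ∃ b ∈ S, a + b = t := by
  unfold canFormA
  simp only [List.any_eq_true, PySem.List.mem_pyRange_one, beq_iff_eq]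
  constructor
  · rintro ⟨i, ⟨hi0, hilen⟩, j, ⟨hij, hjlen⟩, hsum⟩
    have hi : i.toNat < S.length := by omega
    have hj : j.toNat < S.length := by omega
    refine ⟨S[i.toNat], List.getElem_mem _, S[j.toNat], List.getElem_mem _, ?_⟩
    rw [PySem.List.pyGetD_of_nonneg _ _ (by omega), PySem.List.pyGetD_of_nonneg _ _ (by omega),
      List.getD_eq_getElem _ _ hi, List.getD_eq_getElem _ _ hj] at hsum
    exact hsum
  · rintro ⟨a, ha, b, hb, hsum⟩
    obtain ⟨ia, hia, rfl⟩ := List.getElem_of_mem ha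
    obtain ⟨ib, hib, rfl⟩ := List.getElem_of_mem hb
    rcases le_total ia ib with hle | hle
    · refine ⟨(ia : Int), ⟨by omega, by omega⟩, (ib : Int), ⟨by exact_mod_cast hle, by omega⟩, ?_⟩
      rw [PySem.List.pyGetD_natCast, PySem.List.pyGetD_natCast,
        List.getD_eq_getElem _ _ hia, List.getD_eq_getElem _ _ hib]
      exact hsum
    · refine ⟨(ib : Int), ⟨by omega, by omega⟩, (ia : Int), ⟨by exact_mod_cast hle, by omega⟩, ?_⟩
      rw [PySem.List.pyGetD_natCast, PySem.List.pyGetD_natCast,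
        List.getD_eq_getElem _ _ hib, List.getD_eq_getElem _ _ hia]
      omega

theorem testB_eq (t : Int) (S : List Int) :
    (PySem.Set.ofList S).any (fun b => PySem.Set.contains (PySem.Set.ofList S) (t - b))
      = canFormA t S := by
  rw [Bool.eq_iff_iff]
  simp only [List.any_eq_true, canForm_iff, PySem.Set.contains_iff, PySem.Set.mem_ofList]
  constructor
  · rintro ⟨b, hb, htb⟩; exact ⟨t - b, htb, b, hb, by ring⟩
  · rintro ⟨a, ha, b, hb, rfl⟩; exact ⟨b, hb, by simpa using ha⟩

theorem children_length {t : Int} {B C : List Int} (h : C ∈ childrenP t B) :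
    B.length ≤ C.length ∧ C.length ≤ B.length + 1 := by
  unfold childrenP at h
  split at h
  · simp only [List.mem_append, List.mem_map, List.mem_range, List.mem_singleton] at h
    rcases h with ⟨i, _, rfl⟩ | rfl <;>
      simp [PySem.List.length_sorted, List.length_set]
  · simp at h

theorem finals_length : ∀ (ts : List Int) (B F : List Int), F ∈ finalsP ts B →
    B.length ≤ F.length ∧ F.length ≤ B.length + ts.length
  | [], B, F, h => by
    simp only [finalsP, List.mem_singleton] at h
    subst h; omega
  | t :: ts, B, F, h => by
    simp only [finalsP, List.mem_flatMap] at h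
    obtain ⟨C, hC, hF⟩ := h
    have h1 := children_length hC
    have h2 := finals_length ts C F hF
    simp only [List.length_cons]; omega

theorem solves_iff (X : Int) : ∀ (ts B : List Int),
    (solvesP X ts B = true ↔ ∃ F ∈ finalsP ts B, (F.length : Int) ≤ X)
  | [], B => by
    by_cases h : (B.length : Int) > X
    · rw [solvesP_gt h]
      simp only [finalsP, List.mem_singleton]
      constructor
      · intro hf; cases hf
      · rintro ⟨F, rfl, hl⟩; omega
    · rw [solvesP_nil h]
      simp only [finalsP, List.mem_singleton]
      exact ⟨fun _ => ⟨B, rfl, by omega⟩, fun _ => by trivial⟩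
  | t :: ts, B => by
    by_cases h : (B.length : Int) > X
    · rw [solvesP_gt h]
      constructor
      · intro hf; cases hf
      · rintro ⟨F, hF, hl⟩
        simp only [finalsP, List.mem_flatMap] at hF
        obtain ⟨C, hC, hF⟩ := hF
        have h1 := children_length hC
        have h2 := finals_length ts C F hF
        omega
    · rw [solvesP_cons h]
      simp only [List.any_eq_true, finalsP, List.mem_flatMap]
      constructor
      · rintro ⟨C, hC, hs⟩
        obtain ⟨F, hF, hl⟩ := (solves_iff X ts C).1 hs
        exact ⟨F, ⟨C, hC, hF⟩, hl⟩
      · rintro ⟨F, ⟨C, hC, hF⟩, hl⟩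
        exact ⟨C, hC, (solves_iff X ts C).2 ⟨F, hF, hl⟩⟩

-- the memo invariant: every stored entry is the memo-free answer
def InvA (seq : List Int) (memo : MemoA) : Prop :=
  ∀ X x B b, memo.get? (X, x, B) = some b → b = solvesP X (seq.drop x.toNat) B

theorem InvA_empty (seq : List Int) : InvA seq PySem.Dict.empty := by
  intro X x B b h
  simp [PySem.Dict.get?_empty] at h

theorem InvA_insert {seq : List Int} {memo : MemoA} {X x : Int} {B : List Int} {b : Bool}
    (h : InvA seq memo) (hb : b = solvesP X (seq.drop x.toNat) B) :
    InvA seq (memo.insert (X, x, B) b) := by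
  intro X' x' B' b' hget
  rw [PySem.Dict.get?_insert] at hget
  split at hget
  · rename_i heq
    obtain ⟨rfl, rfl, rfl⟩ : X' = X ∧ x' = x ∧ B' = B := by simpa [Prod.ext_iff] using heq
    injection hget with hbb
    exact hbb ▸ hb
  · exact h _ _ _ _ hget

theorem canSolve_correct (seq : List Int) (X : Int) :
    ∀ (fuel : Nat) (x : Int) (B : List Int) (memo : MemoA),
      InvA seq memo → 0 ≤ x → x.toNat ≤ seq.length → seq.length - x.toNat < fuel →
      (canSolveA seq X fuel x B memo).1 = solvesP X (seq.drop x.toNat) B ∧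
      InvA seq (canSolveA seq X fuel x B memo).2 := by
  intro fuel
  induction fuel with
  | zero => intro x B memo _ _ _ hf; exact absurd hf (by omega)
  | succ fuel ih =>
    intro x B memo hInv hx0 hxn hfuel
    simp only [canSolveA]
    cases hget : PySem.Dict.get? memo (X, x, B) with
    | some v =>
      exact ⟨hInv _ _ _ _ hget, hInv⟩
    | none =>
      by_cases hlen : (B.length : Int) > X
      · rw [if_pos hlen]
        exact ⟨(solvesP_gt hlen).symm, hInv⟩
      · rw [if_neg hlen]
        by_cases hxeq : x = (seq.length : Int)
        · rw [if_pos (by simp [hxeq])]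
          have hxN : x.toNat = seq.length := by omega
          rw [hxN, List.drop_length]
          exact ⟨(solvesP_nil hlen).symm, hInv⟩
        · rw [if_neg (by simp [hxeq])]
          set t := PySem.List.pyGetD seq x 0 with ht
          have hxlt : x.toNat < seq.length := by omega
          have htg : t = seq[x.toNat] := by
            rw [ht, PySem.List.pyGetD_of_nonneg _ _ hx0, List.getD_eq_getElem _ _ hxlt]
          have hx1 : (x + 1).toNat = x.toNat + 1 := by omega
          have hdrop : seq.drop x.toNat = t :: seq.drop (x + 1).toNat := by
            rw [List.drop_eq_getElem_cons hxlt, ← htg, hx1]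
          by_cases hform : canFormA t B = true
          · rw [if_pos hform]
            have hchild : solvesP X (seq.drop x.toNat) B =
                (((PySem.List.pyRange 0 (B.length : Int) 1).any fun e =>
                    solvesP X (seq.drop (x + 1).toNat)
                      (PySem.List.sorted (B.set e.toNat t) (fun v => v) false)) ||
                  solvesP X (seq.drop (x + 1).toNat)
                    (PySem.List.sorted (B ++ [t]) (fun v => v) false)) := by
              rw [hdrop, solvesP_cons hlen]
              unfold childrenP
              rw [if_pos hform, List.any_append, PySem.List.pyRange_zero_natCast,
                List.any_map, List.any_map]
              simp [Function.comp_def, Int.toNat_natCast]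
            have hfold : ∀ (es : List Int) (b : Bool) (m : MemoA), InvA seq m →
                ((es.foldl
                    (fun (st : Bool × MemoA) e =>
                      if st.1 then st
                      else canSolveA seq X fuel (x + 1)
                        (PySem.List.sorted (B.set e.toNat t) (fun v => v) false) st.2)
                    (b, m)).1
                  = (b || es.any fun e =>
                      solvesP X (seq.drop (x + 1).toNat)
                        (PySem.List.sorted (B.set e.toNat t) (fun v => v) false)) ∧
                InvA seq ((es.foldl
                    (fun (st : Bool × MemoA) e =>
                      if st.1 then st
                      else canSolveA seq X fuel (x + 1)
                        (PySem.List.sorted (B.set e.toNat t) (fun v => v) false) st.2)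
                    (b, m)).2)) := by
              intro es
              induction es with
              | nil => intro b m hm; simpa using hm
              | cons e es ihe =>
                intro b m hm
                simp only [List.foldl_cons, List.any_cons]
                by_cases hb : b = true
                · subst hb
                  rw [if_pos (show ((true : Bool), m).1 = true from rfl)]
                  obtain ⟨h1, h2⟩ := ihe true m hm
                  exact ⟨by rw [h1]; simp, h2⟩
                · have hb' : b = false := by simpa using hb
                  subst hb'
                  rw [if_neg (show ¬(((false : Bool), m).1 = true) from fun h => nomatch h)]
                  simp only [Bool.false_or]
                  have hrec := ih (x + 1)
                    (PySem.List.sorted (B.set e.toNat t) (fun v => v) false) m hm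
                    (by omega) (by omega) (by omega)
                  obtain ⟨ha, hi⟩ := ihe (canSolveA seq X fuel (x + 1)
                      (PySem.List.sorted (B.set e.toNat t) (fun v => v) false) m).1
                    (canSolveA seq X fuel (x + 1)
                      (PySem.List.sorted (B.set e.toNat t) (fun v => v) false) m).2 hrec.2
                  refine ⟨?_, by simpa using hi⟩
                  rw [ha, hrec.1]
            obtain ⟨hst1, hst2⟩ := hfold (PySem.List.pyRange 0 (B.length : Int) 1) false memo hInv
            simp only [Bool.false_or] at hst1
            by_cases hs : ((PySem.List.pyRange 0 (B.length : Int) 1).foldl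
                (fun (st : Bool × MemoA) e =>
                  if st.1 then st
                  else canSolveA seq X fuel (x + 1)
                    (PySem.List.sorted (B.set e.toNat t) (fun v => v) false) st.2)
                (false, memo)).1 = true
            · rw [if_pos hs]
              have hval : solvesP X (seq.drop x.toNat) B = true := by
                rw [hchild]
                rw [hs] at hst1
                rw [← hst1]
                simp
              exact ⟨hval.symm, InvA_insert hst2 hval.symm⟩
            · rw [if_neg hs]
              have hs' : ((PySem.List.pyRange 0 (B.length : Int) 1).foldl
                  (fun (st : Bool × MemoA) e =>
                    if st.1 then st
                    else canSolveA seq X fuel (x + 1)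
                      (PySem.List.sorted (B.set e.toNat t) (fun v => v) false) st.2)
                  (false, memo)).1 = false := by simpa using hs
              have hany : ((PySem.List.pyRange 0 (B.length : Int) 1).any fun e =>
                  solvesP X (seq.drop (x + 1).toNat)
                    (PySem.List.sorted (B.set e.toNat t) (fun v => v) false)) = false := by
                rw [← hst1]; exact hs' 
              have hrec := ih (x + 1)
                (PySem.List.sorted (B ++ [t]) (fun v => v) false) _ hst2
                (by omega) (by omega) (by omega)
              have hval : solvesP X (seq.drop x.toNat) B =
                  (canSolveA seq X fuel (x + 1)
                    (PySem.List.sorted (B ++ [t]) (fun v => v) false)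
                    ((PySem.List.pyRange 0 (B.length : Int) 1).foldl
                      (fun (st : Bool × MemoA) e =>
                        if st.1 then st
                        else canSolveA seq X fuel (x + 1)
                          (PySem.List.sorted (B.set e.toNat t) (fun v => v) false) st.2)
                      (false, memo)).2).1 := by
                rw [hchild, hany, hrec.1]
                simp
              by_cases hr : (canSolveA seq X fuel (x + 1)
                  (PySem.List.sorted (B ++ [t]) (fun v => v) false)
                  ((PySem.List.pyRange 0 (B.length : Int) 1).foldl
                    (fun (st : Bool × MemoA) e =>
                      if st.1 then st
                      else canSolveA seq X fuel (x + 1)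
                        (PySem.List.sorted (B.set e.toNat t) (fun v => v) false) st.2)
                    (false, memo)).2).1 = true
              · rw [if_pos hr]
                rw [hr] at hval
                exact ⟨hval.symm, InvA_insert hrec.2 hval.symm⟩
              · rw [if_neg hr]
                rw [Bool.eq_false_iff.mpr hr] at hval
                exact ⟨hval.symm, InvA_insert hrec.2 hval.symm⟩
          · rw [if_neg hform]
            have hval : solvesP X (seq.drop x.toNat) B = false := by
              rw [hdrop, solvesP_cons hlen]
              unfold childrenP
              rw [if_neg hform]
              rfl
            exact ⟨hval.symm, InvA_insert hInv hval.symm⟩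

def firstSatP (seq : List Int) : List Int → Int
  | [] => -1
  | X :: rest =>
    if solvesP X (seq.drop 1) [PySem.List.pyGetD seq 0 0] then X else firstSatP seq rest

theorem outer_eq (seq : List Int) (h1 : 1 ≤ seq.length) :
    ∀ (Xs : List Int) (memo : MemoA), InvA seq memo →
      outerLoopA seq Xs memo = firstSatP seq Xs := by
  intro Xs
  induction Xs with
  | nil => intro memo _; rfl
  | cons X rest ih =>
    intro memo hInv
    have h := canSolve_correct seq X (seq.length + 1) 1 [PySem.List.pyGetD seq 0 0] memo hInv
      (by omega) (by omega) (by omega)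
    simp only [outerLoopA, firstSatP]
    rw [h.1]
    simp only [Int.toNat_one]
    split
    · rfl
    · exact ih _ h.2

-- ---- B side ----

def innerStep (t : Int) (nxt : PySem.Set (List Int)) (S : List Int) : PySem.Set (List Int) :=
  if (PySem.Set.ofList S).any (fun b => PySem.Set.contains (PySem.Set.ofList S) (t - b)) then
    PySem.Set.add
      ((List.range S.length).foldl
        (fun (nxt : PySem.Set (List Int)) i =>
          PySem.Set.add nxt (PySem.List.sorted (S.set i t) (fun v => v) false)) nxt)
      (PySem.List.sorted (S ++ [t]) (fun v => v) false)
  else nxt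

theorem mem_innerStep {t : Int} {nxt : PySem.Set (List Int)} {S C : List Int} :
    C ∈ innerStep t nxt S ↔ C ∈ nxt ∨ C ∈ childrenP t S := by
  unfold innerStep childrenP
  rw [testB_eq]
  split
  · rw [show ((List.range S.length).foldl
        (fun (nxt : PySem.Set (List Int)) i =>
          PySem.Set.add nxt (PySem.List.sorted (S.set i t) (fun v => v) false)) nxt)
      = PySem.Set.update nxt ((List.range S.length).map
          (fun i => PySem.List.sorted (S.set i t) (fun v => v) false)) from by
        rw [PySem.Set.update, List.foldl_map]]
    rw [PySem.Set.mem_add, PySem.Set.mem_update]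
    simp only [List.mem_append, List.mem_singleton]
    tauto
  · simp

theorem mem_innerFold (t : Int) :
    ∀ (fr : List (List Int)) (init : PySem.Set (List Int)) (C : List Int),
      C ∈ fr.foldl (innerStep t) init ↔ C ∈ init ∨ ∃ S ∈ fr, C ∈ childrenP t S := by
  intro fr
  induction fr with
  | nil => intro init C; simp
  | cons S fr ih =>
    intro init C
    simp only [List.foldl_cons, ih, mem_innerStep, List.mem_cons]
    constructor
    · rintro ((h | h) | ⟨S', hS', h⟩)
      · exact Or.inl h
      · exact Or.inr ⟨S, Or.inl rfl, h⟩
      · exact Or.inr ⟨S', Or.inr hS', h⟩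
    · rintro (h | ⟨S', (rfl | hS'), h⟩)
      · exact Or.inl (Or.inl h)
      · exact Or.inl (Or.inr h)
      · exact Or.inr ⟨S', hS', h⟩

theorem mem_outerFold :
    ∀ (ts : List Int) (fr : PySem.Set (List Int)) (C : List Int),
      C ∈ ts.foldl (fun fr t => fr.foldl (innerStep t) PySem.Set.empty) fr ↔
        ∃ B0 ∈ fr, C ∈ finalsP ts B0 := by
  intro ts
  induction ts with
  | nil =>
    intro fr C
    simp only [List.foldl_nil, finalsP, List.mem_singleton]
    constructor
    · intro h; exact ⟨C, h, rfl⟩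
    · rintro ⟨B0, hB0, rfl⟩; exact hB0
  | cons t ts ih =>
    intro fr C
    simp only [List.foldl_cons, ih, mem_innerFold]
    simp only [finalsP, List.mem_flatMap, PySem.Set.empty]
    constructor
    · rintro ⟨C', (h | ⟨S, hS, hC'⟩), h2⟩
      · simp at h
      · exact ⟨S, hS, C', hC', h2⟩
    · rintro ⟨S, hS, C', hC', h2⟩
      exact ⟨C', Or.inr ⟨S, hS, hC'⟩, h2⟩

theorem firstSat_none (seq : List Int)
    (h : ∀ X : Int, solvesP X (seq.drop 1) [PySem.List.pyGetD seq 0 0] = false) :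
    ∀ Xs : List Int, firstSatP seq Xs = -1 := by
  intro Xs
  induction Xs with
  | nil => rfl
  | cons X rest ih => simp only [firstSatP, h X]; simpa using ih

theorem firstSat_min (seq : List Int) (m : Int)
    (hm : ∀ X : Int, (solvesP X (seq.drop 1) [PySem.List.pyGetD seq 0 0] = true ↔ m ≤ X)) :
    ∀ (k : Nat) (a b : Int), (b - a).toNat = k → a ≤ m → m < b →
      firstSatP seq (PySem.List.pyRange a b 1) = m := by
  intro k
  induction k with
  | zero => intro a b hk ham hmb; omega
  | succ k ih =>
    intro a b hk ham hmb
    rw [PySem.List.pyRange_one_cons (by omega)]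
    simp only [firstSatP]
    by_cases heq : a = m
    · subst heq
      rw [if_pos ((hm a).2 le_rfl)]
    · have hlt : a < m := by omega
      rw [if_neg (by
        intro hs
        have := (hm a).1 hs
        omega)]
      exact ih (a + 1) b (by omega) (by omega) hmb

-- ===== VERDICT (by name: the statement is the Claim_ definition above) =====
theorem minimum_variables_needed_spec : Claim_equal_minimum_variables_needed := by
  unfold Claim_equal_minimum_variables_needed Spec_minimum_variables_needed
  intro seq _
  cases seq with
  | nil => decide
  | cons s0 rest =>
    have hg0 : PySem.List.pyGetD (s0 :: rest) 0 0 = s0 := by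
      simp [PySem.List.pyGetD]
    have hA : minimum_variables_needed (s0 :: rest) =
        firstSatP (s0 :: rest)
          (PySem.List.pyRange 1 (((s0 :: rest).length : Int) + 1) 1) := by
      unfold minimum_variables_needed
      exact outer_eq _ (by simp) _ _ (InvA_empty _)
    have hBdef : minimum_variables_needed_alt (s0 :: rest) =
        PySem.List.minD
          (((rest.foldl (fun fr t => fr.foldl (innerStep t) PySem.Set.empty)
              (PySem.Set.ofList [[s0]])).map (fun S => (S.length : Int))))
          (fun v => v) (-1) := rfl
    have hmemF : ∀ C, C ∈ (rest.foldl (fun fr t => fr.foldl (innerStep t) PySem.Set.empty)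
        (PySem.Set.ofList [[s0]])) ↔ C ∈ finalsP rest [s0] := by
      intro C
      rw [mem_outerFold]
      constructor
      · rintro ⟨B0, hB0, hC⟩
        rw [PySem.Set.mem_ofList] at hB0
        simp only [List.mem_singleton] at hB0
        exact hB0 ▸ hC
      · intro hC
        exact ⟨[s0], by rw [PySem.Set.mem_ofList]; simp, hC⟩
    rw [hA, hBdef]
    by_cases hne : finalsP rest [s0] = []
    · have hfe : (rest.foldl (fun fr t => fr.foldl (innerStep t) PySem.Set.empty)
          (PySem.Set.ofList [[s0]])) = [] := by
        rw [List.eq_nil_iff_forall_not_mem]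
        intro C hC
        rw [hmemF] at hC
        rw [hne] at hC
        simp at hC
      rw [hfe]
      rw [show (([] : List (List Int)).map (fun S => (S.length : Int))) = [] from rfl,
        PySem.List.minD_nil]
      exact firstSat_none _ (by
        intro X
        rw [← Bool.not_eq_true, solves_iff]
        push Not
        intro F hF
        rw [show (s0 :: rest).drop 1 = rest from rfl, hg0] at hF
        rw [hne] at hF
        simp at hF) _
    · obtain ⟨F0, hF0⟩ := List.exists_mem_of_ne_nil _ hne
      have hfne : ((rest.foldl (fun fr t => fr.foldl (innerStep t) PySem.Set.empty)
          (PySem.Set.ofList [[s0]])).map (fun S => (S.length : Int))) ≠ [] := by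
        simp only [ne_eq, List.map_eq_nil_iff]
        exact List.ne_nil_of_mem ((hmemF F0).2 hF0)
      have hmm := PySem.List.minD_mem _ (fun v => v) (-1) hfne
      obtain ⟨S, hSf, hSm⟩ := List.mem_map.1 hmm
      have hSfin : S ∈ finalsP rest [s0] := (hmemF S).1 hSf
      have hmin : ∀ F ∈ finalsP rest [s0],
          PySem.List.minD
            (((rest.foldl (fun fr t => fr.foldl (innerStep t) PySem.Set.empty)
                (PySem.Set.ofList [[s0]])).map (fun S => (S.length : Int))))
            (fun v => v) (-1) ≤ (F.length : Int) := by
        intro F hF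
        exact PySem.List.minD_id_le _ _ _
          (List.mem_map_of_mem ((hmemF F).2 hF))
      have hsolve : ∀ X : Int,
          (solvesP X ((s0 :: rest).drop 1) [PySem.List.pyGetD (s0 :: rest) 0 0] = true ↔
            PySem.List.minD
              (((rest.foldl (fun fr t => fr.foldl (innerStep t) PySem.Set.empty)
                  (PySem.Set.ofList [[s0]])).map (fun S => (S.length : Int))))
              (fun v => v) (-1) ≤ X) := by
        intro X
        rw [show (s0 :: rest).drop 1 = rest from rfl, hg0, solves_iff]
        constructor
        · rintro ⟨F, hF, hl⟩
          exact le_trans (hmin F hF) hl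
        · intro hX
          exact ⟨S, hSfin, hSm ▸ hX⟩
      have hlb := finals_length rest [s0] S hSfin
      have hSm' : (S.length : Int) = PySem.List.minD
          (((rest.foldl (fun fr t => fr.foldl (innerStep t) PySem.Set.empty)
              (PySem.Set.ofList [[s0]])).map (fun S => (S.length : Int))))
          (fun v => v) (-1) := hSm
      refine firstSat_min _ _ hsolve ((((s0 :: rest).length : Int) + 1) - 1).toNat 1 _ rfl
        ?_ ?_
      · rw [← hSm']
        simp only [List.length_cons, List.length_nil] at hlb
        omega
      · rw [← hSm']
        simp only [List.length_cons, List.length_nil] at hlb ⊢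
        omega
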